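-- pv_equiv track=rewrite | github.com/wrd233/information-center | Video Transcript API/app/bilibili_adapter.py | redact_command
-- ===== SOURCE A (Python) =====
-- def redact_command(command: list[str]) -> list[str]:
--     redacted = []
--     skip_next = False
--     for part in command:
--         if skip_next:
--             redacted.append("***")
--             skip_next = False
--             continue
--         redacted.append(part)
--         if part in {"--cookie", "-c", "--access-token", "-token"}:
--             skip_next = True
--     return redacted
-- ===== SOURCE B (Python) =====
-- def redact_command(command: list[str]) -> list[str]:
--     # Recursive divide-at-first-flag: find the earliest sensitive flag, copy the
--     # untouched prefix (including the flag) by slicing, mask the token after it,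
--     # and recurse on the remainder past the masked token.
--     flags = {"--cookie", "-c", "--access-token", "-token"}
--     for i, part in enumerate(command):
--         if part in flags:
--             masked = ["***"] if i + 1 < len(command) else []
--             return command[:i + 1] + masked + redact_command(command[i + 2:])
--     return list(command)
-- ===== Notes on version B (the rewrite author's own statement) =====
-- stated objective: alternative
-- what changed: Replaces the element-wise boolean state machine with a recursive divide-and-conquer: find the first sensitive flag, copy the untouched prefix by slicing, emit '***' for the consumed token, and recurse on the rest; lists with no flags are returned whole.
import Mathlib
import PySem

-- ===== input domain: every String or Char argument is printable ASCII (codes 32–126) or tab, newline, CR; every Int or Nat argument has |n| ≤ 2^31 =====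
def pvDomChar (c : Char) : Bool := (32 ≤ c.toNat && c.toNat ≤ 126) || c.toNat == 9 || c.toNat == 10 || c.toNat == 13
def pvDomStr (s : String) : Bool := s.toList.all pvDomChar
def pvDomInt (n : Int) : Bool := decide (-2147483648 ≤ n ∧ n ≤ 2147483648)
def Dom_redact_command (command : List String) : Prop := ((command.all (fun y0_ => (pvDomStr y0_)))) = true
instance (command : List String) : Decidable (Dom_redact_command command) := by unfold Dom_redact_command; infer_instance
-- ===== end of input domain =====

-- B replaces A's element-wise skip_next state machine with a recursive split at the first sensitive flag (slice prefix + '***' + recurse); same O(n), alternative decomposition.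


-- ===== PORT A =====
def pvIsFlag (part : String) : Bool :=
  part == "--cookie" || part == "-c" || part == "--access-token" || part == "-token"

-- A's loop: carries (redacted, skip_next) across iterations
def redactLoopA : List String → List String → Bool → List String
  | [], redacted, _ => redacted
  | part :: rest, redacted, skip_next =>
    if skip_next then redactLoopA rest (redacted ++ ["***"]) false
    else redactLoopA rest (redacted ++ [part]) (pvIsFlag part)

def redact_command (command : List String) : List String :=
  redactLoopA command [] false

-- ===== PORT B =====
-- B's enumerate scan: index of the first sensitive flag (i starts at the given offset)
def findFlagIdx : List String → Nat → Option Nat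
  | [], _ => none
  | part :: rest, i => if pvIsFlag part then some i else findFlagIdx rest (i + 1)

theorem findFlagIdx_some_lt : ∀ (l : List String) (k i : Nat),
    findFlagIdx l k = some i → k ≤ i ∧ i - k < l.length := by
  intro l
  induction l with
  | nil => intro k i hh; simp [findFlagIdx] at hh
  | cons p rest ih =>
    intro k i h
    by_cases hp : pvIsFlag p = true
    · simp [findFlagIdx, hp] at h
      simp only [List.length_cons]
      omega
    · simp [findFlagIdx, hp] at h
      have := ih (k + 1) i h
      simp only [List.length_cons]
      omega

-- B: slice the untouched prefix through the flag, mask the next token, recurse past it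
-- (python slices command[:i+1] / command[i+2:] with i ≥ 0 are exactly take/drop)
def redact_command_alt (command : List String) : List String :=
  match h : findFlagIdx command 0 with
  | none => command
  | some i =>
    command.take (i + 1) ++ (if i + 1 < command.length then ["***"] else [])
      ++ redact_command_alt (command.drop (i + 2))
termination_by command.length
decreasing_by
  have := findFlagIdx_some_lt command 0 i h
  simp only [List.length_drop]
  omega

-- ===== PRECONDITION & SPEC =====
def Spec_redact_command (command : List String) (out : List String) : Prop := out = redact_command_alt command
instance (command : List String) (out : List String) : Decidable (Spec_redact_command command out) := by unfold Spec_redact_command; infer_instance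

-- ===== CLAIM (what is proved, stated in full; the proofs are below) =====
def Claim_equal_redact_command : Prop := ∀ (command : List String), Dom_redact_command command → Spec_redact_command command (redact_command command)

-- ===== LEMMAS AND PROOFS =====
-- proof-side element-wise characterisation bridging the two ports
def redactSpec : List String → List String
  | [] => []
  | part :: rest =>
    if pvIsFlag part then
      match rest with
      | [] => [part]
      | _ :: t => part :: "***" :: redactSpec t
    else part :: redactSpec rest

theorem redactLoopA_false (l : List String) :
    ∀ acc, redactLoopA l acc false = acc ++ redactSpec l := by
  induction l using redactSpec.induct with
  | case1 => intro acc; simp [redactLoopA, redactSpec]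
  | case2 part hflag =>
    intro acc; simp [redactLoopA, redactSpec, hflag]
  | case3 part hflag x t ih =>
    intro acc
    simp only [redactLoopA, hflag, if_true]
    conv_rhs => rw [redactSpec.eq_def]
    simp [hflag, ih]
  | case4 part rest hflag ih =>
    intro acc
    simp only [redactLoopA]
    conv_rhs => rw [redactSpec.eq_def]
    simp [hflag, ih]

theorem redactSpec_no_flag : ∀ (l : List String) (k : Nat),
    findFlagIdx l k = none → redactSpec l = l := by
  intro l
  induction l with
  | nil => intro _ _; rfl
  | cons p rest ih =>
    intro k h
    by_cases hp : pvIsFlag p = true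
    · simp [findFlagIdx, hp] at h
    · simp [findFlagIdx, hp] at h
      rw [redactSpec.eq_def]
      simp [hp, ih _ h]

theorem redactSpec_split : ∀ (l : List String) (i : Nat),
    findFlagIdx l 0 = some i →
    redactSpec l = l.take (i + 1) ++ (if i + 1 < l.length then ["***"] else [])
      ++ redactSpec (l.drop (i + 2)) := by
  intro l
  induction l with
  | nil => intro i h; simp [findFlagIdx] at h
  | cons p rest ih =>
    intro i h
    by_cases hp : pvIsFlag p = true
    · simp [findFlagIdx, hp] at h
      subst h
      match rest with
      | [] => simp [redactSpec, hp]
      | x :: t => simp [redactSpec, hp]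
    · simp [findFlagIdx, hp] at h
      -- shift the offset: findFlagIdx rest 1 = some i  →  findFlagIdx rest 0 = some (i-1)
      have hshift : ∀ (m : List String) (k j : Nat), findFlagIdx m (k + 1) = some (j + 1) →
          findFlagIdx m k = some j := by
        intro m
        induction m with
        | nil => intro k j hm; simp [findFlagIdx] at hm
        | cons q qs ihq =>
          intro k j hm
          by_cases hq : pvIsFlag q = true
          · simp [findFlagIdx, hq] at hm ⊢; omega
          · simp [findFlagIdx, hq] at hm ⊢; exact ihq _ _ hm
      have hge := findFlagIdx_some_lt rest 1 i h
      obtain ⟨j, rfl⟩ : ∃ j, i = j + 1 := ⟨i - 1, by omega⟩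
      have h0 := hshift rest 0 j h
      rw [redactSpec.eq_def]
      simp only [hp, Bool.false_eq_true, if_false]
      rw [ih _ h0]
      simp only [List.take_succ_cons, List.drop_succ_cons, List.length_cons]
      have heq : j + 1 + 1 < rest.length + 1 ↔ j + 1 < rest.length := by omega
      simp only [heq]
      simp

theorem alt_eq_spec : ∀ (l : List String), redact_command_alt l = redactSpec l := by
  intro l
  induction l using redact_command_alt.induct with
  | case1 l h => rw [redact_command_alt, h, redactSpec_no_flag l 0 h]
  | case2 l i h ih =>
    have e1 : redact_command_alt l = l.take (i + 1) ++ (if i + 1 < l.length then ["***"] else [])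
        ++ redact_command_alt (l.drop (i + 2)) := by
      rw [redact_command_alt, h]
    rw [e1, ih, ← redactSpec_split l i h]

-- ===== VERDICT (by name: the statement is the Claim_ definition above) =====
theorem redact_command_spec : Claim_equal_redact_command := by
  intro command _
  unfold Spec_redact_command redact_command
  rw [alt_eq_spec]
  simpa using redactLoopA_false command []
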